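-- pv_equiv track=rewrite | github.com/MirzaeiSfu/GraphVAE-REQ | motif_store.py | _create_sort_indices
-- ===== SOURCE A (Python) =====
-- from itertools import permutations
--
-- def _create_sort_indices(masked_variables, relation_check, relation_names):
--     """Create indices to sort variables for matrix multiplication chain."""
--     sort_indice = []
--     sorted_variables = []
--
--     if not relation_check:
--         sort_indice.append([False, 0])
--         sorted_variables.append(masked_variables[0])
--     else:
--         indices_permutations = list(permutations(range(len(masked_variables))))
--         variables_permutations = list(permutations(masked_variables))
--         found_chain = False
--
--         for idx_perm, var_perm in zip(indices_permutations, variables_permutations):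
--             indices_chain = []
--             variables_chain = []
--             first = var_perm[0].split(',')[0]
--             second = var_perm[0].split(',')[1]
--             indices_chain.append([False, idx_perm[0]])
--             variables_chain.append(var_perm[0])
--             untransposed_check = True
--
--             for k in range(1, len(var_perm)):
--                 next_first = var_perm[k].split(',')[0]
--                 next_second = var_perm[k].split(',')[1]
--                 if second == next_first:
--                     second = next_second
--                     indices_chain.append([False, idx_perm[k]])
--                     variables_chain.append(var_perm[k])
--                 elif second == next_second:
--                     second = next_first
--                     indices_chain.append([True, idx_perm[k]])
--                     variables_chain.append(next_second + ',' + next_first)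
--                 else:
--                     untransposed_check = False
--                     break
--
--             if untransposed_check:
--                 sort_indice = indices_chain
--                 sorted_variables = variables_chain
--                 found_chain = True
--                 break
--
--     return sort_indice, sorted_variables
-- ===== SOURCE B (Python) =====
-- def _create_sort_indices(masked_variables, relation_check, relation_names):
--     """Backtracking DFS over indices in ascending order: finds the
--     lexicographically-first permutation ordering the masked variables
--     into a connected chain, abandoning prefixes that cannot extend."""
--     if not relation_check:
--         return [[False, 0]], [masked_variables[0]]
--
--     n = len(masked_variables)
--     used = [False] * n
--
--     def dfs(second, idx_chain, var_chain):
--         if len(idx_chain) == n: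
--             return idx_chain, var_chain
--         for i in range(n):
--             if used[i]:
--                 continue
--             parts = masked_variables[i].split(',')
--             first, nxt = parts[0], parts[1]
--             if second == first:
--                 used[i] = True
--                 r = dfs(nxt, idx_chain + [[False, i]], var_chain + [masked_variables[i]])
--                 used[i] = False
--             elif second == nxt:
--                 used[i] = True
--                 r = dfs(first, idx_chain + [[True, i]], var_chain + [nxt + ',' + first])
--                 used[i] = False
--             else:
--                 r = None
--             if r is not None:
--                 return r
--         return None
--
--     for i in range(n):
--         second = masked_variables[i].split(',')[1]
--         used[i] = True
--         r = dfs(second, [[False, i]], [masked_variables[i]])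
--         used[i] = False
--         if r is not None:
--             return r
--     return [], []
-- ===== Notes on version B (the rewrite author's own statement) =====
-- stated objective: alternative
-- what changed: A materialises all n! index/variable permutations and checks each full permutation from scratch; B does a backtracking DFS over indices in ascending order, abandoning any prefix that cannot extend the chain, so the lexicographically-first valid permutation is produced without building the permutation lists.
-- outside the precondition, e.g. on _create_sort_indices([], True, []): A raises IndexError, B returns ([], []); on _create_sort_indices(['a,b', 'c'], True, []): A raises IndexError, B raises IndexError; on _create_sort_indices([], False, []): A raises IndexError, B raises IndexError
import Mathlib
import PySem

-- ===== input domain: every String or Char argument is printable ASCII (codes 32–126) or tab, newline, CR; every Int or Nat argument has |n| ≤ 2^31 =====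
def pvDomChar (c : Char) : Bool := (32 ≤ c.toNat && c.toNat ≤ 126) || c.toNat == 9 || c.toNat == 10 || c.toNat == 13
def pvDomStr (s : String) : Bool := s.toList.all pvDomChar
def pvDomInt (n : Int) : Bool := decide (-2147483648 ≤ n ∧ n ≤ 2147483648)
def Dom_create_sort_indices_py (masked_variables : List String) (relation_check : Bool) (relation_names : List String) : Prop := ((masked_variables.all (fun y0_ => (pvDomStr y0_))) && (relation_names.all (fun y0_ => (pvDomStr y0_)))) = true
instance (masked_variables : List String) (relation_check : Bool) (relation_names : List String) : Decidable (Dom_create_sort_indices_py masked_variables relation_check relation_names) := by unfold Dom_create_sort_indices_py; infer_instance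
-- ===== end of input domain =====

-- B replaces A's scan over the materialised list of all n! permutations by a
-- backtracking DFS over indices in ascending order that abandons every prefix
-- that cannot be extended to a connected chain; the first full chain found is
-- A's first successful permutation, so the return values coincide (no argument
-- is mutated; equivalence is proved on Pre_, the inputs where A returns).

-- ===== PORT A =====

-- helper for itertools.permutations: all ways to pick one element, keeping the rest in order
def pySelections {α : Type} : List α → List (α × List α)
  | [] => []
  | x :: xs => (x, xs) :: (pySelections xs).map (fun p => (p.1, x :: p.2))

-- itertools.permutations(l) in its generation (lexicographic-by-position) order;
-- fuel only makes the recursion structural: with fuel ≥ l.length it is complete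
def pyPermsF {α : Type} : Nat → List α → List (List α)
  | _, [] => [[]]
  | 0, _ :: _ => []
  | f + 1, x :: xs =>
    (pySelections (x :: xs)).flatMap (fun p => (pyPermsF f p.2).map (fun q => p.1 :: q))

def pyPermutations {α : Type} (l : List α) : List (List α) := pyPermsF l.length l

-- the inner `for k in range(1, len(var_perm))` loop of A
def pyAChain (pairs : List (Int × String)) (second : String)
    (idxAcc : List (Bool × Int)) (varAcc : List String) :
    Option ((List (Bool × Int)) × List String) :=
  match pairs with
  | [] => some (idxAcc, varAcc)
  | (i, v) :: rest =>
    let nf := ((PySem.Str.split? v ",").getD []).getD 0 ""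
    let ns := ((PySem.Str.split? v ",").getD []).getD 1 ""
    if second == nf then pyAChain rest ns (idxAcc ++ [(false, i)]) (varAcc ++ [v])
    else if second == ns then
      pyAChain rest nf (idxAcc ++ [(true, i)]) (varAcc ++ [ns ++ "," ++ nf])
    else none

-- the outer `for idx_perm, var_perm in zip(...)` loop of A (first success wins)
def pyALoop (perms : List (List Int × List String)) : (List (Bool × Int)) × List String :=
  match perms with
  | [] => ([], [])
  | (ip, vp) :: rest =>
    let v0 := vp.getD 0 ""
    let second := ((PySem.Str.split? v0 ",").getD []).getD 1 ""
    match pyAChain ((ip.zip vp).drop 1) second [(false, ip.getD 0 0)] [v0] with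
    | some r => r
    | none => pyALoop rest

def create_sort_indices_py (masked_variables : List String) (relation_check : Bool)
    (relation_names : List String) : (List (Bool × Int)) × List String :=
  if relation_check = false then ([(false, 0)], [masked_variables.getD 0 ""])
  else
    pyALoop ((pyPermutations ((List.range masked_variables.length).map (fun (i : Nat) => (i : Int)))).zip
      (pyPermutations masked_variables))

-- ===== PORT B =====

-- the recursive dfs of B; fuel only makes it structural (fuel = slots still free
-- after the next placement, so it is never exhausted before the length test fires)
def pyBTry (mv : List String) (fuel : Nat) (used : List Bool) (second : String)
    (idxAcc : List (Bool × Int)) (varAcc : List String) :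
    Option ((List (Bool × Int)) × List String) :=
  if idxAcc.length = mv.length then some (idxAcc, varAcc)
  else
    match fuel with
    | 0 => none
    | fuel + 1 =>
      (List.range mv.length).findSome? (fun i =>
        if used.getD i true then none
        else
          let v := mv.getD i ""
          let nf := ((PySem.Str.split? v ",").getD []).getD 0 ""
          let ns := ((PySem.Str.split? v ",").getD []).getD 1 ""
          if second == nf then
            pyBTry mv fuel (used.set i true) ns (idxAcc ++ [(false, (i : Int))]) (varAcc ++ [v])
          else if second == ns then
            pyBTry mv fuel (used.set i true) nf (idxAcc ++ [(true, (i : Int))])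
              (varAcc ++ [ns ++ "," ++ nf])
          else none)

def create_sort_indices_py_alt (masked_variables : List String) (relation_check : Bool)
    (relation_names : List String) : (List (Bool × Int)) × List String :=
  if relation_check = false then ([(false, 0)], [masked_variables.getD 0 ""])
  else
    match (List.range masked_variables.length).findSome? (fun i =>
      let v := masked_variables.getD i ""
      let second := ((PySem.Str.split? v ",").getD []).getD 1 ""
      pyBTry masked_variables (masked_variables.length - 1)
        ((List.replicate masked_variables.length false).set i true) second
        [(false, (i : Int))] [v]) with
    | some r => r
    | none => ([], [])

-- ===== PRECONDITION & SPEC =====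

-- Pre_ excludes exactly the inputs on which the Python A raises IndexError:
-- empty masked_variables (masked_variables[0] / var_perm[0]), and, when
-- relation_check is set, any element without a comma (split(',')[1]).
def Pre_create_sort_indices_py (masked_variables : List String) (relation_check : Bool)
    (relation_names : List String) : Prop :=
  masked_variables ≠ [] ∧
    (relation_check = true → ∀ s ∈ masked_variables, (',' : Char) ∈ s.toList)
instance (masked_variables : List String) (relation_check : Bool) (relation_names : List String) :
    Decidable (Pre_create_sort_indices_py masked_variables relation_check relation_names) := by
  unfold Pre_create_sort_indices_py; infer_instance

def pvWitness_create_sort_indices_py : List String × Bool × List String :=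
  (["a,b", "b,c"], true, [])

def Spec_create_sort_indices_py (masked_variables : List String) (relation_check : Bool)
    (relation_names : List String) (out : (List (Bool × Int)) × List String) : Prop :=
  out = create_sort_indices_py_alt masked_variables relation_check relation_names
instance (masked_variables : List String) (relation_check : Bool) (relation_names : List String)
    (out : (List (Bool × Int)) × List String) :
    Decidable (Spec_create_sort_indices_py masked_variables relation_check relation_names out) := by
  unfold Spec_create_sort_indices_py; infer_instance

-- ===== CLAIM (what is proved, stated in full; the proofs are below) =====
def Claim_equal_create_sort_indices_py : Prop := ∀ (masked_variables : List String) (relation_check : Bool) (relation_names : List String), Dom_create_sort_indices_py masked_variables relation_check relation_names → Pre_create_sort_indices_py masked_variables relation_check relation_names → Spec_create_sort_indices_py masked_variables relation_check relation_names (create_sort_indices_py masked_variables relation_check relation_names)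

-- ===== LEMMAS AND PROOFS =====

-- ---- the common abstraction: chains and DFS over index lists ----

-- A's chain check, restated over the Nat indices of masked_variables
def chainN (mv : List String) : List Nat → String → List (Bool × Int) → List String →
    Option ((List (Bool × Int)) × List String)
  | [], _, ia, va => some (ia, va)
  | i :: rest, second, ia, va =>
    let v := mv.getD i ""
    let nf := ((PySem.Str.split? v ",").getD []).getD 0 ""
    let ns := ((PySem.Str.split? v ",").getD []).getD 1 ""
    if second == nf then chainN mv rest ns (ia ++ [(false, (i : Int))]) (va ++ [v])
    else if second == ns then chainN mv rest nf (ia ++ [(true, (i : Int))]) (va ++ [ns ++ "," ++ nf])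
    else none

-- the DFS over a list of still-available indices, phrased with pySelections
def dfsN (mv : List String) : Nat → List Nat → String → List (Bool × Int) → List String →
    Option ((List (Bool × Int)) × List String)
  | _, [], _, ia, va => some (ia, va)
  | 0, _ :: _, _, _, _ => none
  | fuel + 1, r :: rs, second, ia, va =>
    (pySelections (r :: rs)).findSome? (fun p =>
      let v := mv.getD p.1 ""
      let nf := ((PySem.Str.split? v ",").getD []).getD 0 ""
      let ns := ((PySem.Str.split? v ",").getD []).getD 1 ""
      if second == nf then dfsN mv fuel p.2 ns (ia ++ [(false, (p.1 : Int))]) (va ++ [v])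
      else if second == ns then
        dfsN mv fuel p.2 nf (ia ++ [(true, (p.1 : Int))]) (va ++ [ns ++ "," ++ nf])
      else none)

def remIdx (n : Nat) (used : List Bool) : List Nat :=
  (List.range n).filter (fun j => !(used.getD j true))

-- ---- generic findSome? lemmas ----

theorem pvFindSome?_congr {α β : Type} {l : List α} {f g : α → Option β}
    (h : ∀ a ∈ l, f a = g a) : l.findSome? f = l.findSome? g := by
  induction l with
  | nil => rfl
  | cons x xs ih =>
    simp only [List.findSome?_cons, h x (by simp)]
    cases g x with
    | some b => rfl
    | none => exact ih (fun a ha => h a (by simp [ha]))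

theorem pvFindSome?_constNone {α β : Type} (l : List α) :
    l.findSome? (fun _ => (none : Option β)) = none := by
  induction l with
  | nil => rfl
  | cons x xs ih => simpa [List.findSome?_cons] using ih

theorem pvFindSome?_map {α β γ : Type} (g : α → β) (l : List α) (f : β → Option γ) :
    (l.map g).findSome? f = l.findSome? (fun a => f (g a)) := by
  induction l with
  | nil => rfl
  | cons x xs ih =>
    simp only [List.map_cons, List.findSome?_cons]
    cases f (g x) <;> simp [ih]

theorem pvFindSome?_flatMap {α β γ : Type} (l : List α) (g : α → List β) (f : β → Option γ) :
    (l.flatMap g).findSome? f = l.findSome? (fun a => (g a).findSome? f) := by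
  induction l with
  | nil => rfl
  | cons x xs ih =>
    simp only [List.flatMap_cons, List.findSome?_append, List.findSome?_cons, ih]
    cases (g x).findSome? f <;> simp [Option.orElse]

-- ---- permutations lemmas ----

theorem pySelections_map {α β : Type} (g : α → β) (l : List α) :
    pySelections (l.map g) = (pySelections l).map (fun p => (g p.1, p.2.map g)) := by
  induction l with
  | nil => rfl
  | cons x xs ih => simp [pySelections, ih, List.map_map, Function.comp]

theorem pyPermsF_map {α β : Type} (g : α → β) :
    ∀ (f : Nat) (l : List α), pyPermsF f (l.map g) = (pyPermsF f l).map (List.map g) := by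
  intro f
  induction f with
  | zero => intro l; cases l <;> simp [pyPermsF]
  | succ f ih =>
    intro l
    cases l with
    | nil => simp [pyPermsF]
    | cons x xs =>
      simp only [List.map_cons, pyPermsF]
      have hsel : pySelections (g x :: List.map g xs) =
          (pySelections (x :: xs)).map (fun p => (g p.1, p.2.map g)) :=
        pySelections_map g (x :: xs)
      rw [hsel]
      simp only [List.flatMap_map, List.map_flatMap, List.map_map, ih]
      simp only [Function.comp_def, List.map_cons]

theorem pvMap_getD_range (l : List String) :
    (List.range l.length).map (fun i => l.getD i "") = l := by
  induction l with
  | nil => rfl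
  | cons a t ih =>
    simp only [List.length_cons, List.range_succ_eq_map, List.map_cons, List.map_map]
    simpa [Function.comp] using ih

-- ---- A-side bridges ----

theorem pyAChain_eq_chainN (mv : List String) :
    ∀ (q : List Nat) (second : String) (ia : List (Bool × Int)) (va : List String),
      pyAChain (q.map (fun (i : Nat) => ((i : Int), mv.getD i ""))) second ia va =
        chainN mv q second ia va := by
  intro q
  induction q with
  | nil => intro second ia va; rfl
  | cons i t ih =>
    intro second ia va
    simp only [List.map_cons, pyAChain, chainN]
    split_ifs <;> first | rfl | simpa using ih _ _ _

def aCheck (pr : List Int × List String) : Option ((List (Bool × Int)) × List String) :=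
  let v0 := pr.2.getD 0 ""
  let second := ((PySem.Str.split? v0 ",").getD []).getD 1 ""
  pyAChain ((pr.1.zip pr.2).drop 1) second [(false, pr.1.getD 0 0)] [v0]

theorem pyALoop_eq (l : List (List Int × List String)) :
    pyALoop l = (l.findSome? aCheck).getD ([], []) := by
  induction l with
  | nil => rfl
  | cons pr rest ih =>
    obtain ⟨ip, vp⟩ := pr
    simp only [pyALoop, List.findSome?_cons]
    cases h : aCheck (ip, vp) with
    | some r => simp [aCheck] at h; simp [h]
    | none => simp [aCheck] at h; simp [h, ih]

-- scanning all completions (in itertools order) from a state = DFS from that state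
theorem permScan_eq_dfsN (mv : List String) :
    ∀ (fuel : Nat) (rem : List Nat) (second : String) (ia : List (Bool × Int)) (va : List String),
      (pyPermsF fuel rem).findSome? (fun p => chainN mv p second ia va) =
        dfsN mv fuel rem second ia va := by
  intro fuel
  induction fuel with
  | zero =>
    intro rem second ia va
    cases rem <;> simp [pyPermsF, dfsN, chainN, List.findSome?_cons]
  | succ f ih =>
    intro rem second ia va
    cases rem with
    | nil => simp [pyPermsF, dfsN, chainN, List.findSome?_cons]
    | cons r rs =>
      simp only [pyPermsF, dfsN, pvFindSome?_flatMap]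
      apply pvFindSome?_congr
      intro p _
      rw [pvFindSome?_map]
      show (pyPermsF f p.2).findSome? (fun q => chainN mv (p.1 :: q) second ia va) = _
      simp only [chainN]
      split_ifs with h1 h2
      · simp only [if_pos h1] at *
        exact ih p.2 _ _ _
      · exact ih p.2 _ _ _
      · exact pvFindSome?_constNone _

-- ---- B-side bridges ----

theorem pvGetD_replicate {n j : Nat} (hj : j < n) (c d : Bool) :
    (List.replicate n c).getD j d = c := by
  simp [List.getD, List.getElem?_replicate, hj]

theorem remIdx_set {n : Nat} {used : List Bool} (hlen : used.length = n) (i : Nat) :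
    remIdx n (used.set i true) = (remIdx n used).filter (fun j => !(j == i)) := by
  unfold remIdx
  rw [List.filter_filter]
  apply List.filter_congr
  intro j hj
  have hjn : j < n := List.mem_range.mp hj
  by_cases hji : j = i
  · subst hji
    have hl : j < used.length := by omega
    simp [List.getElem?_set, hl]
  · simp [List.getElem?_set, Ne.symm hji, hji]

theorem remIdx_nodup (n : Nat) (used : List Bool) : (remIdx n used).Nodup :=
  (List.nodup_range).filter _

theorem pvFilter_ne_length {l : List Nat} {i : Nat} (hnd : l.Nodup) (hi : i ∈ l) :
    (l.filter (fun j => !(j == i))).length + 1 = l.length := by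
  induction l with
  | nil => simp at hi
  | cons x xs ih =>
    rcases List.mem_cons.mp hi with h | h
    · subst h
      have hall : ∀ j ∈ xs, ((fun j => !(j == i)) j) = true := by
        intro j hj
        have : j ≠ i := fun e => (List.nodup_cons.mp hnd).1 (e ▸ hj)
        simp [this]
      rw [List.filter_cons_of_neg (by simp), List.filter_eq_self.mpr hall]
      simp
    · have hx : x ≠ i := fun e => (List.nodup_cons.mp hnd).1 (e ▸ h)
      rw [List.filter_cons_of_pos (by simp [hx])]
      have := ih (List.nodup_cons.mp hnd).2 h
      simp only [List.length_cons]
      omega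

-- scanning `range n`, skipping used slots, equals scanning the selections of remIdx
theorem pvLemR {n : Nat} {used : List Bool}
    (K : Nat → List Nat → Option ((List (Bool × Int)) × List String)) :
    ∀ (idxs : List Nat) (preU : List Nat),
      idxs.Nodup →
      remIdx n used = preU ++ idxs.filter (fun j => !(used.getD j true)) →
      (∀ i ∈ idxs, i ∉ preU) →
      used.length = n →
      idxs.findSome? (fun i =>
          if used.getD i true then none else K i (remIdx n (used.set i true))) =
        ((pySelections (idxs.filter (fun j => !(used.getD j true)))).map
            (fun p => (p.1, preU ++ p.2))).findSome? (fun p => K p.1 p.2) := by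
  intro idxs
  induction idxs with
  | nil => intro preU _ _ _ _; rfl
  | cons i t ih =>
    intro preU hnd hrem hdisj hlen
    by_cases hu : used.getD i true
    · have hu' : used[i]?.getD true = true := by simpa [List.getD] using hu
      have hfil0 : (i :: t).filter (fun j => !(used.getD j true)) =
          t.filter (fun j => !(used.getD j true)) := by
        simp [List.filter_cons, List.getD, hu']
      simp only [List.findSome?_cons, if_pos hu]
      rw [ih preU (List.nodup_cons.mp hnd).2 (hfil0 ▸ hrem)
        (fun j hj => hdisj j (by simp [hj])) hlen]
      rw [hfil0]
    · have hu' : used[i]?.getD true = false := by simpa [List.getD] using hu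
      have hfil : (i :: t).filter (fun j => !(used.getD j true)) =
          i :: t.filter (fun j => !(used.getD j true)) := by
        simp [List.filter_cons, List.getD, hu']
      have hE : remIdx n (used.set i true) = preU ++ t.filter (fun j => !(used.getD j true)) := by
        have h1 : preU.filter (fun j => !(j == i)) = preU := by
          apply List.filter_eq_self.mpr
          intro j hj
          have : j ≠ i := fun e => hdisj i (by simp) (e ▸ hj)
          simp [this]
        have h2 : (t.filter (fun j => !(used.getD j true))).filter (fun j => !(j == i)) =
            t.filter (fun j => !(used.getD j true)) := by
          apply List.filter_eq_self.mpr
          intro j hj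
          have hjt : j ∈ t := List.mem_of_mem_filter hj
          have : j ≠ i := fun e => (List.nodup_cons.mp hnd).1 (e ▸ hjt)
          simp [this]
        rw [remIdx_set hlen, hrem, hfil, List.filter_append, h1,
          List.filter_cons_of_neg (by simp), h2]
      simp only [List.findSome?_cons, if_neg hu, hfil, pySelections, List.map_cons,
        List.findSome?_cons]
      rw [hE]
      cases K i (preU ++ t.filter (fun j => !(used.getD j true))) with
      | some r => rfl
      | none =>
        rw [ih (preU ++ [i]) (List.nodup_cons.mp hnd).2
          (by rw [hrem, hfil]; simp)
          (by
            intro j hj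
            simp only [List.mem_append, List.mem_singleton]
            rintro (h | h)
            · exact hdisj j (by simp [hj]) h
            · exact (List.nodup_cons.mp hnd).1 (h ▸ hj)) hlen]
        simp [List.map_map, Function.comp_def]

-- B's dfs on a used-array equals the selections DFS on the remaining indices
theorem pyBTry_eq_dfsN (mv : List String) :
    ∀ (fuel : Nat) (used : List Bool) (second : String) (ia : List (Bool × Int))
      (va : List String),
      used.length = mv.length →
      ia.length + (remIdx mv.length used).length = mv.length →
      pyBTry mv fuel used second ia va = dfsN mv fuel (remIdx mv.length used) second ia va := by
  intro fuel
  induction fuel with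
  | zero =>
    intro used second ia va hlen hinv
    by_cases h : ia.length = mv.length
    · have : (remIdx mv.length used).length = 0 := by omega
      have hnil : remIdx mv.length used = [] := List.length_eq_zero_iff.mp this
      simp [pyBTry, h, hnil, dfsN]
    · have hlpos0 : (remIdx mv.length used).length ≠ 0 := by omega
      have hne : remIdx mv.length used ≠ [] := fun e => hlpos0 (by rw [e]; rfl)
      obtain ⟨r, rs, hr⟩ := List.exists_cons_of_ne_nil hne
      simp [pyBTry, h, hr, dfsN]
  | succ f ih =>
    intro used second ia va hlen hinv
    by_cases h : ia.length = mv.length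
    · have : (remIdx mv.length used).length = 0 := by omega
      have hnil : remIdx mv.length used = [] := List.length_eq_zero_iff.mp this
      simp [pyBTry, h, hnil, dfsN]
    · have hlpos : (remIdx mv.length used).length ≠ 0 := by omega
      have hne : remIdx mv.length used ≠ [] := fun e => hlpos (by rw [e]; rfl)
      obtain ⟨r, rs, hr⟩ := List.exists_cons_of_ne_nil hne
      have hlem := pvLemR (n := mv.length) (used := used)
        (K := fun i rest =>
          let v := mv.getD i ""
          let nf := ((PySem.Str.split? v ",").getD []).getD 0 ""
          let ns := ((PySem.Str.split? v ",").getD []).getD 1 ""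
          if second == nf then dfsN mv f rest ns (ia ++ [(false, (i : Int))]) (va ++ [v])
          else if second == ns then
            dfsN mv f rest nf (ia ++ [(true, (i : Int))]) (va ++ [ns ++ "," ++ nf])
          else none)
        (List.range mv.length) [] List.nodup_range (by simp [remIdx]) (by simp) hlen
      have hcongr :
          (List.range mv.length).findSome? (fun i =>
            if used.getD i true then none
            else
              let v := mv.getD i ""
              let nf := ((PySem.Str.split? v ",").getD []).getD 0 ""
              let ns := ((PySem.Str.split? v ",").getD []).getD 1 ""
              if second == nf then
                pyBTry mv f (used.set i true) ns (ia ++ [(false, (i : Int))]) (va ++ [v])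
              else if second == ns then
                pyBTry mv f (used.set i true) nf (ia ++ [(true, (i : Int))])
                  (va ++ [ns ++ "," ++ nf])
              else none) =
          (List.range mv.length).findSome? (fun i =>
            if used.getD i true then none
            else
              (fun i rest =>
                let v := mv.getD i ""
                let nf := ((PySem.Str.split? v ",").getD []).getD 0 ""
                let ns := ((PySem.Str.split? v ",").getD []).getD 1 ""
                if second == nf then dfsN mv f rest ns (ia ++ [(false, (i : Int))]) (va ++ [v])
                else if second == ns then
                  dfsN mv f rest nf (ia ++ [(true, (i : Int))]) (va ++ [ns ++ "," ++ nf])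
                else none) i (remIdx mv.length (used.set i true))) := by
        apply pvFindSome?_congr
        intro i hi
        have hin : i < mv.length := List.mem_range.mp hi
        by_cases hu : used.getD i true
        · simp only [if_pos hu]
        · have hu2 : used[i]?.getD true = false := by simpa [List.getD] using hu
          have hiRem : i ∈ remIdx mv.length used := by
            unfold remIdx; simp [List.mem_filter, List.mem_range, hin, hu2]
          have hlen' : (used.set i true).length = mv.length := by simp [hlen]
          have hrlen : (remIdx mv.length (used.set i true)).length + 1 =
              (remIdx mv.length used).length := by
            rw [remIdx_set hlen]
            exact pvFilter_ne_length (remIdx_nodup _ _) hiRem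
          have hinv' : ∀ (e : Bool × Int),
              (ia ++ [e]).length + (remIdx mv.length (used.set i true)).length = mv.length := by
            intro e; simp only [List.length_append, List.length_cons, List.length_nil]; omega
          simp only [if_neg hu]
          split_ifs with h1 h2
          · exact ih _ _ _ _ hlen' (hinv' _)
          · exact ih _ _ _ _ hlen' (hinv' _)
          · rfl
      rw [pyBTry]
      simp only [if_neg h]
      rw [hcongr, hlem]
      have hfeq : (List.range mv.length).filter (fun j => !(used.getD j true)) =
          remIdx mv.length used := rfl
      rw [hfeq, hr, dfsN]
      rw [show (pySelections (r :: rs)).map (fun p => (p.1, ([] : List Nat) ++ p.2)) =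
        pySelections (r :: rs) from by simp]

-- ===== final assembly =====

theorem pyPermsF_pos {α : Type} (f : Nat) (l : List α) (h : l ≠ []) :
    pyPermsF (f + 1) l =
      (pySelections l).flatMap (fun p => (pyPermsF f p.2).map (fun q => p.1 :: q)) := by
  cases l with
  | nil => exact absurd rfl h
  | cons x xs => rfl

theorem pvRange_filter_replicate (n : Nat) :
    (List.range n).filter (fun j => !((List.replicate n false).getD j true)) = List.range n := by
  apply List.filter_eq_self.mpr
  intro j hj
  simp [List.getElem?_replicate, List.mem_range.mp hj]

theorem create_sort_indices_py_spec : Claim_equal_create_sort_indices_py := by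
  unfold Claim_equal_create_sort_indices_py
  intro mv rc rn _ hpre
  unfold Spec_create_sort_indices_py
  cases rc with
  | false => rfl
  | true =>
    obtain ⟨hne, -⟩ := hpre
    obtain ⟨m, hm⟩ : ∃ m, mv.length = m + 1 := by
      cases mv with
      | nil => exact absurd rfl hne
      | cons a t => exact ⟨t.length, rfl⟩
    -- the common value both sides reduce to
    have hA : create_sort_indices_py mv true rn =
        ((pySelections (List.range mv.length)).findSome? (fun p =>
          dfsN mv m p.2 (((PySem.Str.split? (mv.getD p.1 "") ",").getD []).getD 1 "")
            [(false, (p.1 : Int))] [mv.getD p.1 ""])).getD ([], []) := by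
      rw [create_sort_indices_py, if_neg (by simp)]
      have h1 : pyPermutations ((List.range mv.length).map (fun (i : Nat) => (i : Int))) =
          (pyPermsF mv.length (List.range mv.length)).map (List.map (fun (i : Nat) => (i : Int))) := by
        rw [pyPermutations]
        simp only [List.length_map, List.length_range]
        exact pyPermsF_map _ _ _
      have h2 : pyPermutations mv =
          (pyPermsF mv.length (List.range mv.length)).map
            (List.map (fun (i : Nat) => mv.getD i "")) := by
        rw [pyPermutations]
        conv_lhs => rw [← pvMap_getD_range mv]
        simp only [List.length_map, List.length_range]
        exact pyPermsF_map _ _ _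
      rw [h1, h2, List.zip_map', pyALoop_eq, pvFindSome?_map]
      have hnr : List.range mv.length ≠ [] := by
        rw [hm]; simp [List.range_succ]
      conv_lhs => rw [hm]
      rw [pyPermsF_pos m _ (hm ▸ hnr), pvFindSome?_flatMap]
      rw [← hm]
      apply congrArg (Option.getD · ([], []))
      apply pvFindSome?_congr
      intro p _
      rw [pvFindSome?_map]
      have hblock : ∀ q : List Nat,
          aCheck (((p.1 :: q).map (fun (i : Nat) => (i : Int))),
                  ((p.1 :: q).map (fun (i : Nat) => mv.getD i ""))) =
          chainN mv q (((PySem.Str.split? (mv.getD p.1 "") ",").getD []).getD 1 "")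
            [(false, (p.1 : Int))] [mv.getD p.1 ""] := by
        intro q
        show aCheck _ = _
        rw [aCheck]
        simp only [List.map_cons, List.zip_cons_cons, List.drop_succ_cons, List.drop_zero,
          List.getD_cons_zero, List.zip_map']
        exact pyAChain_eq_chainN mv q _ _ _
      calc (pyPermsF m p.2).findSome? (fun q =>
              aCheck (((p.1 :: q).map (fun (i : Nat) => (i : Int))),
                      ((p.1 :: q).map (fun (i : Nat) => mv.getD i ""))))
          = (pyPermsF m p.2).findSome? (fun q =>
              chainN mv q (((PySem.Str.split? (mv.getD p.1 "") ",").getD []).getD 1 "")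
                [(false, (p.1 : Int))] [mv.getD p.1 ""]) := by
            apply pvFindSome?_congr; intro q _; exact hblock q
        _ = _ := permScan_eq_dfsN mv m p.2 _ _ _
    have hB : create_sort_indices_py_alt mv true rn =
        ((pySelections (List.range mv.length)).findSome? (fun p =>
          dfsN mv m p.2 (((PySem.Str.split? (mv.getD p.1 "") ",").getD []).getD 1 "")
            [(false, (p.1 : Int))] [mv.getD p.1 ""])).getD ([], []) := by
      have hguard :
          (List.range mv.length).findSome? (fun i =>
            let v := mv.getD i ""
            let second := ((PySem.Str.split? v ",").getD []).getD 1 ""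
            pyBTry mv (mv.length - 1) ((List.replicate mv.length false).set i true) second
              [(false, (i : Int))] [v]) =
          (List.range mv.length).findSome? (fun i =>
            if (List.replicate mv.length false).getD i true then none
            else
              (fun i rest =>
                dfsN mv m rest (((PySem.Str.split? (mv.getD i "") ",").getD []).getD 1 "")
                  [(false, (i : Int))] [mv.getD i ""]) i
                (remIdx mv.length ((List.replicate mv.length false).set i true))) := by
        apply pvFindSome?_congr
        intro i hi
        have hin : i < mv.length := List.mem_range.mp hi
        have hg : (List.replicate mv.length false).getD i true = false :=
          pvGetD_replicate hin false true
        rw [if_neg (by simp [List.getD, List.getElem?_replicate, hin])]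
        have hlen0 : ((List.replicate mv.length false).set i true).length = mv.length := by simp
        have hrem0 : remIdx mv.length ((List.replicate mv.length false).set i true) =
            (List.range mv.length).filter (fun j => !(j == i)) := by
          rw [remIdx_set (by simp)]
          have : remIdx mv.length (List.replicate mv.length false) = List.range mv.length := by
            unfold remIdx; exact pvRange_filter_replicate mv.length
          rw [this]
        have hrlen : (remIdx mv.length ((List.replicate mv.length false).set i true)).length + 1 =
            mv.length := by
          rw [hrem0]
          have := pvFilter_ne_length (l := List.range mv.length) (i := i)
            List.nodup_range (List.mem_range.mpr hin)
          simpa using this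
        have := pyBTry_eq_dfsN mv (mv.length - 1)
          ((List.replicate mv.length false).set i true)
          (((PySem.Str.split? (mv.getD i "") ",").getD []).getD 1 "")
          [(false, (i : Int))] [mv.getD i ""] hlen0 (by simp; omega)
        rw [hm] at this ⊢
        simpa using this
      rw [create_sort_indices_py_alt, if_neg (by simp)]
      rw [hguard]
      rw [pvLemR (n := mv.length) (used := List.replicate mv.length false)
        (K := fun i rest =>
          dfsN mv m rest (((PySem.Str.split? (mv.getD i "") ",").getD []).getD 1 "")
            [(false, (i : Int))] [mv.getD i ""])
        (List.range mv.length) [] List.nodup_range (by simp [remIdx]) (by simp) (by simp)]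
      rw [pvRange_filter_replicate]
      have hclean : (pySelections (List.range mv.length)).map
          (fun p => (p.1, ([] : List Nat) ++ p.2)) = pySelections (List.range mv.length) := by
        simp
      rw [hclean]
      split <;> (rename_i heq; rw [heq]) <;> rfl
    rw [hA, hB]
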